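-- pv_equiv track=rewrite | github.com/Yawkata/nekvorepo | services/repo-service/app/services/efs.py | _is_path_deleted
-- ===== SOURCE A (Python) =====
-- def _is_path_deleted(rel_path: str, deleted: set[str]) -> bool:
--     """
--     Return True if rel_path or any ancestor segment appears in the deleted set.
--     Example: if "docs" is in deleted, then "docs/api.md" returns True.
--     """
--     if rel_path in deleted:
--         return True
--     parts = rel_path.split("/")
--     for i in range(1, len(parts)):
--         if "/".join(parts[:i]) in deleted:
--             return True
--     return False
-- ===== SOURCE B (Python) =====
-- def _is_path_deleted(rel_path: str, deleted: set[str]) -> bool: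
--     if rel_path in deleted:
--         return True
--     prefix = ""
--     for ch in rel_path:
--         if ch == "/" and prefix in deleted:
--             return True
--         prefix += ch
--     return False
-- ===== Notes on version B (the rewrite author's own statement) =====
-- stated objective: alternative
-- what changed: Replaced split('/') plus rebuilding '/'.join(parts[:i]) for every i by a single left-to-right character scan that maintains the running prefix and tests it against the set at each '/' encountered.
import Mathlib
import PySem

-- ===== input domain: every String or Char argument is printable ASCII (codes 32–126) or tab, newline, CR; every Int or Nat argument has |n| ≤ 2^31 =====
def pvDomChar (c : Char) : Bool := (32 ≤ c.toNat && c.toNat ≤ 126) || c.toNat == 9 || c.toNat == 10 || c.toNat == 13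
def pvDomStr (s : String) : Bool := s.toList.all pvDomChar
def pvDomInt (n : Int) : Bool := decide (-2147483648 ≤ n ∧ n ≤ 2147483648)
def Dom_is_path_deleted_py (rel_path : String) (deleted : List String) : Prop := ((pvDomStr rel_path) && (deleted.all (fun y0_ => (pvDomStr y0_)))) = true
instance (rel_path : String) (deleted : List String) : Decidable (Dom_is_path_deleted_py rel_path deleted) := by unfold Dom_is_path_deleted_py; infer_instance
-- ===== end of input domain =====

-- B replaces split('/') + rebuilding '/'.join(parts[:i]) for each i by one left-to-right character
-- scan that keeps the running prefix and tests it at each '/' (objective: alternative decomposition).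


-- ===== PORT A =====
-- rel_path.split("/") is ported as PySem.Chars.splitOn on .toList (the sep ≠ "" form of split — exact here
-- since the sep is the literal "/"); parts[:i] as PySem.List.slice, "/".join(…) as PySem.Chars.join,
-- range(1, len(parts)) as PySem.List.pyRange, the for-loop with early return as .any.
def is_path_deleted_py (rel_path : String) (deleted : List String) : Bool :=
  if PySem.Set.contains deleted rel_path then true
  else
    let parts := PySem.Chars.splitOn rel_path.toList ['/']
    (PySem.List.pyRange 1 (parts.length : Int)).any (fun i =>
      PySem.Set.contains deleted
        (String.ofList (PySem.Chars.join ['/'] (PySem.List.slice parts none (some i)))))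

-- ===== PORT B =====
-- the for-ch loop of Source B: 'prefix' is the accumulator, tested at each '/', appended after the test
def altLoop (deleted : List String) : List Char → List Char → Bool
  | _, [] => false
  | pre, c :: rest =>
    if c == '/' && PySem.Set.contains deleted (String.ofList pre) then true
    else altLoop deleted (pre ++ [c]) rest

def is_path_deleted_py_alt (rel_path : String) (deleted : List String) : Bool :=
  if PySem.Set.contains deleted rel_path then true
  else altLoop deleted [] rel_path.toList

-- ===== PRECONDITION & SPEC =====
def Spec_is_path_deleted_py (rel_path : String) (deleted : List String) (out : Bool) : Prop := out = is_path_deleted_py_alt rel_path deleted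
instance (rel_path : String) (deleted : List String) (out : Bool) : Decidable (Spec_is_path_deleted_py rel_path deleted out) := by unfold Spec_is_path_deleted_py; infer_instance

-- ===== CLAIM (what is proved, stated in full; the proofs are below) =====
def Claim_equal_is_path_deleted_py : Prop := ∀ (rel_path : String) (deleted : List String), Dom_is_path_deleted_py rel_path deleted → Spec_is_path_deleted_py rel_path deleted (is_path_deleted_py rel_path deleted)

-- ===== LEMMAS AND PROOFS =====

-- reference model of rel_path.split("/") at char level
def consHead (c : Char) : List (List Char) → List (List Char)
  | [] => [[c]]
  | p :: ps => (c :: p) :: ps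

def spSplit : List Char → List (List Char)
  | [] => [[]]
  | c :: rest => if c = '/' then [] :: spSplit rest else consHead c (spSplit rest)

def consHeadL (pre : List Char) : List (List Char) → List (List Char)
  | [] => [pre]
  | p :: ps => (pre ++ p) :: ps

theorem spSplit_ne_nil (cs : List Char) : spSplit cs ≠ [] := by
  cases cs with
  | nil => simp [spSplit]
  | cons c rest =>
    simp only [spSplit]
    split
    · simp
    · cases h : spSplit rest <;> simp [consHead]

theorem consHeadL_append (pre : List Char) (c : Char) (l : List (List Char)) :
    consHeadL (pre ++ [c]) l = consHeadL pre (consHead c l) := by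
  cases l <;> simp [consHeadL, consHead]

theorem go_spec (fuel : Nat) : ∀ (l cur : List Char) (accL : List (List Char)),
    l.length < fuel →
    PySem.Chars.splitOn.go ['/'] fuel l cur accL = accL.reverse ++ consHeadL cur.reverse (spSplit l) := by
  induction fuel with
  | zero => intro l cur accL h; omega
  | succ fuel ih =>
    intro l cur accL h
    cases l with
    | nil =>
      simp [PySem.Chars.splitOn.go, spSplit, consHeadL]
    | cons c rest =>
      rw [PySem.Chars.splitOn.go]
      by_cases hc : c = '/'
      · subst hc
        simp only [List.isPrefixOf, List.length_cons] at *
        rw [if_pos (by simp)]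
        simp only [List.length_nil, List.drop_succ_cons, List.drop_zero, Nat.zero_add]
        rw [ih rest [] (cur.reverse :: accL) (by simpa using h)]
        obtain ⟨p, ps, hps⟩ : ∃ p ps, spSplit rest = p :: ps := by
          cases hsp : spSplit rest with
          | nil => exact absurd hsp (spSplit_ne_nil rest)
          | cons p ps => exact ⟨p, ps, rfl⟩
        simp [spSplit, hps, consHeadL]
      · rw [if_neg (by simp; exact fun he => hc he.symm)]
        rw [ih rest (c :: cur) accL (by simp at h ⊢; omega)]
        simp only [spSplit, if_neg hc, List.reverse_cons]
        rw [consHeadL_append]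

theorem spEq (cs : List Char) : PySem.Chars.splitOn cs ['/'] = spSplit cs := by
  rw [PySem.Chars.splitOn, go_spec (cs.length + 1) cs [] [] (by omega)]
  obtain ⟨p, ps, hps⟩ : ∃ p ps, spSplit cs = p :: ps := by
    cases hsp : spSplit cs with
    | nil => exact absurd hsp (spSplit_ne_nil cs)
    | cons p ps => exact ⟨p, ps, rfl⟩
  simp [hps, consHeadL]

-- the proper prefixes "/".join(parts[:i]), i = 1 .. len(parts)-1, built structurally
def joinPref : List (List Char) → List (List Char)
  | [] => []
  | [_] => []
  | p :: q :: ps => p :: (joinPref (q :: ps)).map (fun r => p ++ '/' :: r)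

theorem range_map_join (parts : List (List Char)) :
    (List.range (parts.length - 1)).map (fun k => PySem.Chars.join ['/'] (parts.take (k + 1)))
      = joinPref parts := by
  induction parts with
  | nil => rfl
  | cons p tail ih =>
    cases tail with
    | nil => rfl
    | cons q ps =>
      simp only [List.length_cons, Nat.add_sub_cancel, List.range_succ_eq_map]
      rw [List.map_cons]
      simp only [List.map_map]
      rw [joinPref]
      congr 1
      · simp [PySem.Chars.join_singleton]
      · rw [← ih]
        simp only [List.length_cons, Nat.add_sub_cancel, List.map_map]
        apply List.map_congr_left
        intro k hk
        simp only [Function.comp_apply, Nat.succ_eq_add_one, List.take_succ_cons]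
        rw [PySem.Chars.join_cons_cons]
        simp

-- prefixes checked by B's scan, starting from accumulated prefix pre
def prefList : List Char → List Char → List (List Char)
  | _, [] => []
  | pre, c :: rest =>
    if c = '/' then pre :: prefList (pre ++ [c]) rest else prefList (pre ++ [c]) rest

theorem prefList_eq (cs : List Char) : ∀ pre,
    prefList pre cs = (joinPref (spSplit cs)).map (pre ++ ·) := by
  induction cs with
  | nil => intro pre; rfl
  | cons c rest ih =>
    intro pre
    obtain ⟨p, ps, hps⟩ : ∃ p ps, spSplit rest = p :: ps := by
      cases hsp : spSplit rest with
      | nil => exact absurd hsp (spSplit_ne_nil rest)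
      | cons p ps => exact ⟨p, ps, rfl⟩
    by_cases hc : c = '/'
    · subst hc
      rw [prefList, if_pos rfl, ih]
      simp only [spSplit, hps]
      simp [joinPref, List.map_map, Function.comp_def]
    · rw [prefList, if_neg hc, ih]
      simp only [spSplit, if_neg hc, hps, consHead]
      cases ps with
      | nil => simp [joinPref]
      | cons q qs =>
        simp only [joinPref, List.map_cons, List.map_map]
        congr 1
        · simp
        · apply List.map_congr_left
          intro r _
          simp

theorem altLoop_eq_any (deleted : List String) (cs : List Char) : ∀ pre,
    altLoop deleted pre cs
      = (prefList pre cs).any (fun s => PySem.Set.contains deleted (String.ofList s)) := by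
  induction cs with
  | nil => intro pre; rfl
  | cons c rest ih =>
    intro pre
    rw [altLoop, prefList]
    by_cases hc : c = '/'
    · subst hc
      by_cases hd : String.ofList pre ∈ deleted
      · simp [hd]
      · simp [hd, ih]
    · simp [hc, ih]

theorem pyRange_one_eq (n : Nat) (hn : 1 ≤ n) :
    PySem.List.pyRange 1 (n : Int) = (List.range (n - 1)).map (fun (k : Nat) => ((k : Int) + 1)) := by
  rw [PySem.List.pyRange_of_pos 1 (n : Int) Int.one_pos]
  have : (if (1:Int) < (n:Int) then (((n:Int) - 1 + 1 - 1) / 1).toNat else 0) = n - 1 := by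
    split <;> omega
  rw [this]
  exact List.map_congr_left (fun k _ => by ring)

theorem main_eq (rel_path : String) (deleted : List String) :
    is_path_deleted_py rel_path deleted = is_path_deleted_py_alt rel_path deleted := by
  unfold is_path_deleted_py is_path_deleted_py_alt
  by_cases h : rel_path ∈ deleted
  · simp [h]
  · rw [if_neg (by simpa using h), if_neg (by simpa using h)]
    simp only [spEq]
    show (PySem.List.pyRange 1 ((spSplit rel_path.toList).length : Int)).any (fun i =>
      PySem.Set.contains deleted
        (String.ofList (PySem.Chars.join ['/'] (PySem.List.slice (spSplit rel_path.toList) none (some i))))) = _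
    have hn : 1 ≤ (spSplit rel_path.toList).length :=
      List.length_pos_iff.mpr (spSplit_ne_nil rel_path.toList)
    rw [pyRange_one_eq _ hn, List.any_map]
    rw [altLoop_eq_any, prefList_eq]
    simp only [List.nil_append, List.map_id_fun', id_eq]
    rw [← range_map_join, List.any_map]
    apply List.any_congr rfl
    intro k
    simp only [Function.comp_apply]
    rw [PySem.List.slice_to _ (by omega : (0:Int) ≤ (k:Int) + 1)]
    norm_num

-- ===== VERDICT (by name: the statement is the Claim_ definition above) =====
theorem is_path_deleted_py_spec : Claim_equal_is_path_deleted_py := by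
  intro rel_path deleted _
  exact main_eq rel_path deleted
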